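-- pv_equiv track=rewrite | github.com/Celestia1l/python_course | CODEWARS/4 codewars.py | flick_switch
-- ===== SOURCE A (Python) =====
-- def flick_switch(lst):
--     a = []
--     value = True
--     for i in lst:
--         if i == 'flick':
--             if value == True:
--                 value = False
--             else:
--                 value = True
--         a.append(value)
--     return a
-- ===== SOURCE B (Python) =====
-- def flick_switch(lst):
--     counts = []
--     total = 0
--     for i in lst:
--         total += (i == 'flick')
--         counts.append(total)
--     return [c % 2 == 0 for c in counts]
-- ===== Notes on version B (the rewrite author's own statement) =====
-- stated objective: alternative
-- what changed: B replaces A's boolean toggle with an integer running count of 'flick' occurrences and derives each state from the count's parity in a second map pass.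
import Mathlib
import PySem

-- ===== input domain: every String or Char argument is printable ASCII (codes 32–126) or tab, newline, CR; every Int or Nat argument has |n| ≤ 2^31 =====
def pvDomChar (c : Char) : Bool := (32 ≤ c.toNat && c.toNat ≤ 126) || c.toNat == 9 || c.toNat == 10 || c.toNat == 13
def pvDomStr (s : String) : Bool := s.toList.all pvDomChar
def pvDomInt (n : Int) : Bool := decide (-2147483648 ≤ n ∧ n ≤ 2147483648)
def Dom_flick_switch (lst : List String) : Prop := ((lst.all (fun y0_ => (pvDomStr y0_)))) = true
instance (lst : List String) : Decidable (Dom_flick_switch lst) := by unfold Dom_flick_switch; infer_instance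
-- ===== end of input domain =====

-- B replaces A's boolean toggle with an integer flick-count and derives each state from parity (alternative decomposition, same cost).


-- ===== PORT A =====
-- a = []; value = True; for i in lst: if i == 'flick': toggle value; a.append(value)
def pvStepA (st : List Bool × Bool) (i : String) : List Bool × Bool :=
  let value := if i == "flick" then (if st.2 == true then false else true) else st.2
  (st.1 ++ [value], value)

def flick_switch (lst : List String) : List Bool :=
  (lst.foldl pvStepA ([], true)).1

-- ===== PORT B =====
-- counts = []; total = 0; for i in lst: total += (i=='flick'); counts.append(total); return [c % 2 == 0 for c in counts]
def pvStepB (st : List Int × Int) (i : String) : List Int × Int :=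
  let total := st.2 + (if i == "flick" then 1 else 0)
  (st.1 ++ [total], total)

def flick_switch_alt (lst : List String) : List Bool :=
  ((lst.foldl pvStepB ([], 0)).1).map (fun c => PySem.Int.mod c 2 == 0)

-- ===== PRECONDITION & SPEC =====
def Spec_flick_switch (lst : List String) (out : List Bool) : Prop := out = flick_switch_alt lst
instance (lst : List String) (out : List Bool) : Decidable (Spec_flick_switch lst out) := by unfold Spec_flick_switch; infer_instance

-- ===== CLAIM (what is proved, stated in full; the proofs are below) =====
def Claim_equal_flick_switch : Prop := ∀ (lst : List String), Dom_flick_switch lst → Spec_flick_switch lst (flick_switch lst)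

-- ===== LEMMAS AND PROOFS =====

theorem pvFoldA_acc (lst : List String) : ∀ (a : List Bool) (v : Bool),
    lst.foldl pvStepA (a, v) = (a ++ (lst.foldl pvStepA ([], v)).1, (lst.foldl pvStepA ([], v)).2) := by
  induction lst with
  | nil => intro a v; simp
  | cons x xs ih =>
    intro a v
    rw [List.foldl_cons, List.foldl_cons]
    show xs.foldl pvStepA (a ++ [_], _) = _
    rw [ih (a ++ [if x == "flick" then (if v == true then false else true) else v]),
        show pvStepA ([], v) x = ([if x == "flick" then (if v == true then false else true) else v],
          if x == "flick" then (if v == true then false else true) else v) from rfl,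
        ih [if x == "flick" then (if v == true then false else true) else v]]
    simp

theorem pvFoldB_acc (lst : List String) : ∀ (b : List Int) (c : Int),
    lst.foldl pvStepB (b, c) = (b ++ (lst.foldl pvStepB ([], c)).1, (lst.foldl pvStepB ([], c)).2) := by
  induction lst with
  | nil => intro b c; simp
  | cons x xs ih =>
    intro b c
    rw [List.foldl_cons, List.foldl_cons]
    show xs.foldl pvStepB (b ++ [_], _) = _
    rw [ih (b ++ [c + (if x == "flick" then 1 else 0)]),
        show pvStepB ([], c) x = ([c + (if x == "flick" then 1 else 0)],
          c + (if x == "flick" then 1 else 0)) from rfl,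
        ih [c + (if x == "flick" then 1 else 0)]]
    simp

theorem pvMod2 (x : Int) : PySem.Int.mod x 2 = x % 2 := by
  simp [PySem.Int.mod, Int.fmod_eq_emod]

theorem pvParity_toggle (c : Int) :
    (if (PySem.Int.mod c 2 == 0) == true then false else true) = (PySem.Int.mod (c + 1) 2 == 0) := by
  rw [pvMod2, pvMod2]
  rcases Int.emod_two_eq_zero_or_one c with h | h <;> simp [h, Int.add_emod]

theorem pvMain (lst : List String) : ∀ (c : Int),
    (lst.foldl pvStepA ([], (PySem.Int.mod c 2 == 0))).1
      = ((lst.foldl pvStepB ([], c)).1).map (fun x => PySem.Int.mod x 2 == 0) := by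
  induction lst with
  | nil => intro c; simp
  | cons x xs ih =>
    intro c
    rw [List.foldl_cons, List.foldl_cons,
        show pvStepA ([], (PySem.Int.mod c 2 == 0)) x
          = ([if x == "flick" then (if (PySem.Int.mod c 2 == 0) == true then false else true)
              else (PySem.Int.mod c 2 == 0)],
             if x == "flick" then (if (PySem.Int.mod c 2 == 0) == true then false else true)
              else (PySem.Int.mod c 2 == 0)) from rfl,
        show pvStepB ([], c) x
          = ([c + (if x == "flick" then 1 else 0)], c + (if x == "flick" then 1 else 0)) from rfl]
    by_cases hx : x == "flick"
    · rw [if_pos hx, if_pos hx, pvParity_toggle c,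
          pvFoldA_acc xs [(PySem.Int.mod (c+1) 2 == 0)] (PySem.Int.mod (c+1) 2 == 0),
          pvFoldB_acc xs [c+1] (c+1)]
      have h := ih (c+1)
      simp only [pvMod2] at h
      simp [h]
    · rw [if_neg hx, if_neg hx,
          pvFoldA_acc xs [(PySem.Int.mod c 2 == 0)] (PySem.Int.mod c 2 == 0),
          pvFoldB_acc xs [c+0] (c+0)]
      have h := ih c
      simp only [pvMod2] at h
      rw [show c + 0 = c from by ring]
      simp [h]

-- ===== VERDICT (by name: the statement is the Claim_ definition above) =====
theorem flick_switch_spec : Claim_equal_flick_switch := by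
  intro lst _
  unfold Spec_flick_switch flick_switch flick_switch_alt
  have := pvMain lst 0
  simpa using this
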